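-- pv_equiv track=rewrite | github.com/deepness1/misc-tools | pixiv/src/dump.py | check_tag
-- ===== SOURCE A (Python) =====
-- def check_tag(whitelist_tags, blacklist_tags, tags):
--     for tag in whitelist_tags:
--         if not tag in tags:
--             return False
--     for tag in blacklist_tags:
--         if tag in tags:
--             return False
--     return True
-- ===== SOURCE B (Python) =====
-- def check_tag(whitelist_tags, blacklist_tags, tags):
--     needed = set(whitelist_tags)
--     banned = set(blacklist_tags)
--     for tag in tags:
--         if tag in banned:
--             return False
--         needed.discard(tag)
--     return not needed
-- ===== Notes on version B (the rewrite author's own statement) =====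
-- stated objective: alternative
-- what changed: Inverts the traversal: instead of looping over whitelist and blacklist with membership scans of tags, B makes one pass over tags, returning False on a banned tag and discarding seen tags from a 'needed' whitelist set, succeeding iff that set ends empty.
import Mathlib
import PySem

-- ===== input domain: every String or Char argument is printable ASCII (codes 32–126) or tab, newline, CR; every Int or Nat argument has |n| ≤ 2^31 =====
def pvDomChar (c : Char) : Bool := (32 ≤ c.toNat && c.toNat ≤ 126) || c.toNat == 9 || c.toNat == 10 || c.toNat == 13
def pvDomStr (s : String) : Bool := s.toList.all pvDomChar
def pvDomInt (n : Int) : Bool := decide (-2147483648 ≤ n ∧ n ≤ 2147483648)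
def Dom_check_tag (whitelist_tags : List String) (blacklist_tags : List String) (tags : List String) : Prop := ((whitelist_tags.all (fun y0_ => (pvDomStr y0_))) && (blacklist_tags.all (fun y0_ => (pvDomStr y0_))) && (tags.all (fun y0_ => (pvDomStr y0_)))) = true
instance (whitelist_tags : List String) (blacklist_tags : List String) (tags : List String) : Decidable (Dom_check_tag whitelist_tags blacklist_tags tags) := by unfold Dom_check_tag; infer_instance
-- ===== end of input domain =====

-- B inverts the traversal: one pass over tags with a shrinking 'needed' whitelist set and an early exit on a banned tag, instead of A's two loops scanning tags.

-- ===== PORT A =====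
-- first loop: return False on the first whitelist tag missing from tags, else fall through to the second loop
def checkTagWhiteLoop (whitelist_tags : List String) (blacklist_tags : List String) (tags : List String) : Bool :=
  match whitelist_tags with
  | [] => checkTagBlackLoop blacklist_tags tags
  | tag :: rest =>
    if !(tags.contains tag) then false
    else checkTagWhiteLoop rest blacklist_tags tags
where
  -- second loop: return False on the first blacklist tag present in tags
  checkTagBlackLoop : List String → List String → Bool
  | [], _ => true
  | tag :: rest, tags => if tags.contains tag then false else checkTagBlackLoop rest tags

def check_tag (whitelist_tags : List String) (blacklist_tags : List String) (tags : List String) : Bool :=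
  checkTagWhiteLoop whitelist_tags blacklist_tags tags

-- ===== PORT B =====
-- the 'for tag in tags' loop: early return False on a banned tag, else discard it from needed
def checkTagAltLoop (banned : PySem.Set String) (needed : PySem.Set String) (tags : List String) : Bool :=
  match tags with
  | [] => needed.isEmpty          -- 'return not needed'
  | tag :: rest =>
    if PySem.Set.contains banned tag then false
    else checkTagAltLoop banned (PySem.Set.discard needed tag) rest

def check_tag_alt (whitelist_tags : List String) (blacklist_tags : List String) (tags : List String) : Bool :=
  checkTagAltLoop (PySem.Set.ofList blacklist_tags) (PySem.Set.ofList whitelist_tags) tags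

-- ===== PRECONDITION & SPEC =====
def Spec_check_tag (whitelist_tags : List String) (blacklist_tags : List String) (tags : List String) (out : Bool) : Prop := out = check_tag_alt whitelist_tags blacklist_tags tags
instance (whitelist_tags : List String) (blacklist_tags : List String) (tags : List String) (out : Bool) : Decidable (Spec_check_tag whitelist_tags blacklist_tags tags out) := by unfold Spec_check_tag; infer_instance

-- ===== CLAIM (what is proved, stated in full; the proofs are below) =====
def Claim_equal_check_tag : Prop := ∀ (whitelist_tags : List String) (blacklist_tags : List String) (tags : List String), Dom_check_tag whitelist_tags blacklist_tags tags → Spec_check_tag whitelist_tags blacklist_tags tags (check_tag whitelist_tags blacklist_tags tags)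

-- ===== LEMMAS AND PROOFS =====
theorem black_loop_iff (bl tags : List String) :
    checkTagWhiteLoop.checkTagBlackLoop bl tags = true ↔ ∀ t ∈ bl, t ∉ tags := by
  induction bl with
  | nil => simp [checkTagWhiteLoop.checkTagBlackLoop]
  | cons t rest ih =>
    simp only [checkTagWhiteLoop.checkTagBlackLoop]
    by_cases h : tags.contains t <;> simp_all

theorem white_loop_iff (wl bl tags : List String) :
    checkTagWhiteLoop wl bl tags = true ↔ (∀ t ∈ wl, t ∈ tags) ∧ (∀ t ∈ bl, t ∉ tags) := by
  induction wl with
  | nil => simp [checkTagWhiteLoop, black_loop_iff]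
  | cons t rest ih =>
    simp only [checkTagWhiteLoop]
    by_cases h : tags.contains t <;> simp_all

theorem alt_loop_iff (banned needed : PySem.Set String) (tags : List String) :
    checkTagAltLoop banned needed tags = true ↔
      (∀ t ∈ tags, t ∉ banned) ∧ (∀ x ∈ needed, x ∈ tags) := by
  induction tags generalizing needed with
  | nil =>
    simp [checkTagAltLoop, List.isEmpty_iff, List.eq_nil_iff_forall_not_mem]
  | cons t rest ih =>
    simp only [checkTagAltLoop]
    by_cases h : PySem.Set.contains banned t = true
    · rw [if_pos h]
      rw [PySem.Set.contains_iff] at h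
      simp only [Bool.false_eq_true, false_iff]
      rintro ⟨hb, _⟩
      exact hb t (by simp) h
    · rw [if_neg h, ih]
      rw [PySem.Set.contains_iff] at h
      constructor
      · rintro ⟨hb, hn⟩
        refine ⟨?_, ?_⟩
        · intro s hs
          rcases List.mem_cons.mp hs with rfl | hs'
          · simpa using h
          · exact hb s hs'
        · intro x hx
          by_cases hxt : x = t
          · simp [hxt]
          · have := hn x ((PySem.Set.mem_discard _ _ _).mpr ⟨hx, hxt⟩)
            exact List.mem_cons.mpr (Or.inr this)
      · rintro ⟨hb, hn⟩
        refine ⟨fun s hs => hb s (List.mem_cons_of_mem _ hs), ?_⟩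
        intro x hx
        rcases (PySem.Set.mem_discard _ _ _).mp hx with ⟨hxn, hxt⟩
        rcases List.mem_cons.mp (hn x hxn) with rfl | h'
        · exact absurd rfl hxt
        · exact h'

theorem check_tag_eq_alt (wl bl tags : List String) :
    check_tag wl bl tags = check_tag_alt wl bl tags := by
  have h1 := white_loop_iff wl bl tags
  have h2 := alt_loop_iff (PySem.Set.ofList bl) (PySem.Set.ofList wl) tags
  rw [Bool.eq_iff_iff]
  unfold check_tag check_tag_alt
  rw [h1, h2]
  simp only [PySem.Set.mem_ofList]
  constructor
  · rintro ⟨hw, hb⟩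
    exact ⟨fun t ht hmem => hb t hmem ht, hw⟩
  · rintro ⟨hb, hw⟩
    exact ⟨hw, fun t ht hmem => hb t hmem ht⟩

-- ===== VERDICT (by name: the statement is the Claim_ definition above) =====
theorem check_tag_spec : Claim_equal_check_tag := by
  intro wl bl tags _
  exact check_tag_eq_alt wl bl tags
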